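-- pv_equiv track=rewrite | github.com/antrikshdhand/usyd-work | 5th Year/INFO3616/assignment-2/Q1_code/frequency.py | english_freq_match_score
-- ===== SOURCE A (Python) =====
-- ETAOIN = 'ETAOINSHRDLCUMWFGYPBVKJXQZ'
--
-- LETTERS = 'ABCDEFGHIJKLMNOPQRSTUVWXYZ'
--
-- def get_letter_count(string):
--     # Returns a dictionary with keys of single letters and values of the
--     # count of how many times they appear in the message
--     letter_count = {'A': 0, 'B': 0, 'C': 0, 'D': 0, 'E': 0, 'F': 0,
--         'G': 0, 'H': 0, 'I': 0, 'J': 0, 'K': 0, 'L': 0, 'M': 0, 'N': 0,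
--         'O': 0, 'P': 0, 'Q': 0, 'R': 0, 'S': 0, 'T': 0, 'U': 0, 'V': 0,
--         'W': 0, 'X': 0, 'Y': 0, 'Z': 0}
--
--     for letter in string.upper():
--         if letter in LETTERS:
--             letter_count[letter] += 1
--
--     return letter_count
--
-- def get_frequency_order(string):
--     letter_to_freq = get_letter_count(string)
--
--     # Now we want to convert this into a dictionary with frequency as key
--     # and a list of letters with that frequency as value
--     freq_to_letter = {}
--     for k, v in letter_to_freq.items():
--         if v not in freq_to_letter:
--             freq_to_letter[v] = []
--         freq_to_letter[v].append(k)
--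
--     # Sort the lists of letters in reverse ETAOIN order to prevent over-counting
--     for k, v in freq_to_letter.items():
--         freq_to_letter[k].sort(key=ETAOIN.find, reverse=True)
--
--         # Convert into string
--         freq_to_letter[k] = "".join(freq_to_letter[k])
--
--     # Get a list of strings in descending order of frequency
--     letters = []
--     for freq in sorted(freq_to_letter.keys(), reverse=True):
--         letters.append(freq_to_letter[freq])
--
--     return "".join(letters)
--
-- def english_freq_match_score(string):
--     # We will calculate a "frequency match score" for a given string
--     # 1. Order the letters in the string by highest frequency to lowest frequency
--     # 2. For each of the six most frequent letters in the string, if they are also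
--     # one of the six most frequent letters in English, then we add 1
--     # 3. Repeat for the six least frequent letters in the string.
--     # Hence, the frequency match schore for a string can range from 0 to 12.
--
--     ordered_str = get_frequency_order(string)
--
--     score = 0
--     for common_chr in ETAOIN[:6]:
--         if common_chr in ordered_str[:6]:
--             score += 1
--     for uncommon_chr in ETAOIN[-6:]:
--         if uncommon_chr in ordered_str[-6:]:
--             score += 1
--
--     return score
-- ===== SOURCE B (Python) =====
-- ETAOIN = 'ETAOINSHRDLCUMWFGYPBVKJXQZ'
--
-- LETTERS = 'ABCDEFGHIJKLMNOPQRSTUVWXYZ'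
--
-- def english_freq_match_score(string):
--     # One composite-key sort replaces the count-dict / bucket-dict / per-bucket-sort
--     # pipeline: 26*count dominates, ETAOIN position breaks ties (reverse gives
--     # descending frequency with reverse-ETAOIN tie-breaking, as in the original).
--     up = string.upper()
--     ordered_str = ''.join(sorted(LETTERS,
--                                  key=lambda c: 26 * up.count(c) + ETAOIN.find(c),
--                                  reverse=True))
--     score = 0
--     for common_chr in ETAOIN[:6]:
--         if common_chr in ordered_str[:6]:
--             score += 1
--     for uncommon_chr in ETAOIN[-6:]:
--         if uncommon_chr in ordered_str[-6:]:
--             score += 1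
--     return score
-- ===== Notes on version B (the rewrite author's own statement) =====
-- stated objective: simpler
-- what changed: Replaces the three-stage pipeline (letter-count dict, bucket-by-frequency dict, per-bucket reverse-ETAOIN sort, concatenation over descending frequencies) with a single sort of the 26 letters by the composite integer key 26*count + ETAOIN-index, descending.
import Mathlib
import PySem

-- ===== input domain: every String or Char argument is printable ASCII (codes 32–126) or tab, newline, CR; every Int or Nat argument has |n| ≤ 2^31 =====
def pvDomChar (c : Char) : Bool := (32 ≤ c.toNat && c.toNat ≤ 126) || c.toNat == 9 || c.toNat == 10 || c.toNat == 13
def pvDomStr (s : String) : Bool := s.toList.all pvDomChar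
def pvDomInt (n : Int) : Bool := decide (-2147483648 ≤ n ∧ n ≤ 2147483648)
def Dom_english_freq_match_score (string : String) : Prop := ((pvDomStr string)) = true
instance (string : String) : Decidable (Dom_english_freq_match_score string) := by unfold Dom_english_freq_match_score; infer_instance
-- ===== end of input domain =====

-- B replaces A's three-dict grouping/sorting pipeline by one composite-key sort of the
-- 26 letters (key 26*count + ETAOIN index, descending); objective: simpler.

def pvETAOIN : List Char := "ETAOINSHRDLCUMWFGYPBVKJXQZ".toList
def pvLETTERS : List Char := "ABCDEFGHIJKLMNOPQRSTUVWXYZ".toList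

-- ===== PORT A =====
-- letter_count[letter] += 1 on an always-present key is Dict.modify with default 0
def pvGetLetterCount (string : String) : PySem.Dict Char Int :=
  let letter_count : PySem.Dict Char Int := PySem.Dict.ofList
    [('A', 0), ('B', 0), ('C', 0), ('D', 0), ('E', 0), ('F', 0),
     ('G', 0), ('H', 0), ('I', 0), ('J', 0), ('K', 0), ('L', 0), ('M', 0), ('N', 0),
     ('O', 0), ('P', 0), ('Q', 0), ('R', 0), ('S', 0), ('T', 0), ('U', 0), ('V', 0),
     ('W', 0), ('X', 0), ('Y', 0), ('Z', 0)]
  (PySem.Chars.upper string.toList).foldl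
    (fun d letter => if PySem.Chars.isIn [letter] pvLETTERS then d.modify letter 0 (· + 1) else d)
    letter_count

-- strings are represented as List Char throughout; the final "".join is the concatenation
-- first loop of get_frequency_order: bucket letters by their frequency
def pvFreqToLetter (string : String) : PySem.Dict Int (List Char) :=
  (pvGetLetterCount string).items.foldl
    (fun d p =>
      let d' := if d.contains p.2 then d else d.insert p.2 []
      d'.modify p.2 [] (· ++ [p.1]))
    PySem.Dict.empty

-- second loop: sort each bucket by ETAOIN.find, reverse, in place (overwrite keeps position)
def pvFreqToLetter2 (string : String) : PySem.Dict Int (List Char) :=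
  (pvFreqToLetter string).items.foldl
    (fun d p => d.insert p.1 (PySem.List.sorted p.2 (fun c => PySem.Chars.find pvETAOIN [c]) true))
    (pvFreqToLetter string)

-- third loop: letters.append(freq_to_letter[freq]) over sorted keys, descending
def pvGetFrequencyOrder (string : String) : List Char :=
  (PySem.List.sorted (pvFreqToLetter2 string).keys (fun x => x) true).foldl
    (fun acc freq => acc ++ (pvFreqToLetter2 string).getD freq []) []

def english_freq_match_score (string : String) : Int :=
  let ordered_str := pvGetFrequencyOrder string
  let score : Int :=
    (PySem.List.slice pvETAOIN none (some 6)).foldl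
      (fun score common_chr =>
        if PySem.Chars.isIn [common_chr] (PySem.List.slice ordered_str none (some 6))
        then score + 1 else score) 0
  (PySem.List.slice pvETAOIN (some (-6)) none).foldl
    (fun score uncommon_chr =>
      if PySem.Chars.isIn [uncommon_chr] (PySem.List.slice ordered_str (some (-6)) none)
      then score + 1 else score) score

-- ===== PORT B =====
def english_freq_match_score_alt (string : String) : Int :=
  let up := PySem.Chars.upper string.toList
  let ordered_str := PySem.List.sorted pvLETTERS
    (fun c => 26 * (PySem.Chars.count up [c] : Int) + PySem.Chars.find pvETAOIN [c]) true
  let score : Int :=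
    (PySem.List.slice pvETAOIN none (some 6)).foldl
      (fun score common_chr =>
        if PySem.Chars.isIn [common_chr] (PySem.List.slice ordered_str none (some 6))
        then score + 1 else score) 0
  (PySem.List.slice pvETAOIN (some (-6)) none).foldl
    (fun score uncommon_chr =>
      if PySem.Chars.isIn [uncommon_chr] (PySem.List.slice ordered_str (some (-6)) none)
      then score + 1 else score) score

-- ===== PRECONDITION & SPEC =====
def Spec_english_freq_match_score (string : String) (out : Int) : Prop := out = english_freq_match_score_alt string
instance (string : String) (out : Int) : Decidable (Spec_english_freq_match_score string out) := by unfold Spec_english_freq_match_score; infer_instance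

-- ===== CLAIM (what is proved, stated in full; the proofs are below) =====
def Claim_equal_english_freq_match_score : Prop := ∀ (string : String), Dom_english_freq_match_score string → Spec_english_freq_match_score string (english_freq_match_score string)

-- ===== LEMMAS AND PROOFS =====

def pvFindE (c : Char) : Int := PySem.Chars.find pvETAOIN [c]
def pvCnt (s : String) (c : Char) : Int := (((PySem.Chars.upper s.toList).count c : Nat) : Int)
def pvGroup (cnt : Char → Int) (f : Int) : List Char := pvLETTERS.filter (fun c => cnt c == f)
def pvK (cnt : Char → Int) : List Int := PySem.Set.ofList (pvLETTERS.map cnt)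

-- s.count(c) for a single character c is List.count
lemma pv_count_go_singleton (c : Char) : ∀ (fuel : Nat) (s : List Char) (acc : Nat),
    s.length ≤ fuel → PySem.Chars.count.go [c] fuel s acc = acc + s.count c := by
  intro fuel
  induction fuel with
  | zero =>
    intro s acc h
    cases s with
    | nil => simp [PySem.Chars.count.go]
    | cons a t => simp at h
  | succ n ih =>
    intro s acc h
    cases s with
    | nil => simp [PySem.Chars.count.go]
    | cons a t =>
      have hstep : PySem.Chars.count.go [c] (n + 1) (a :: t) acc =
          (if c == a then PySem.Chars.count.go [c] n t (acc + 1)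
           else PySem.Chars.count.go [c] n t acc) := by
        simp [PySem.Chars.count.go, List.isPrefixOf]
      rw [hstep]
      have ht : t.length ≤ n := by simpa using h
      by_cases hc : c = a
      · rw [if_pos (by simp [hc]), ih t (acc + 1) ht]
        simp [hc]
        omega
      · rw [if_neg (by simp [hc]), ih t acc ht, List.count_cons_of_ne (Ne.symm hc)]

lemma pv_count_singleton (s : List Char) (c : Char) : PySem.Chars.count s [c] = s.count c := by
  simpa [PySem.Chars.count] using pv_count_go_singleton c s.length s 0 le_rfl

lemma pv_isIn_singleton (x : Char) (l : List Char) :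
    PySem.Chars.isIn [x] l = true ↔ x ∈ l := by
  rw [PySem.Chars.isIn_iff_infix]
  constructor
  · intro h
    exact List.singleton_sublist.mp h.sublist
  · intro h
    obtain ⟨s, t, rfl⟩ := List.append_of_mem h
    exact ⟨s, t, by simp⟩

lemma pv_set_update_id {α : Type} [BEq α] [LawfulBEq α] (l : List α) :
    ∀ (s : PySem.Set α), (∀ x ∈ l, x ∈ s) → PySem.Set.update s l = s := by
  induction l with
  | nil => intro s _; rfl
  | cons a t ih =>
    intro s h
    have ha : PySem.Set.add s a = s := by
      simp [PySem.Set.add, h a (by simp)]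
    show PySem.Set.update (PySem.Set.add s a) t = s
    rw [ha]
    exact ih s (fun x hx => h x (by simp [hx]))

lemma pv_getD_foldl_insert_of_not_mem {κ ν β : Type} [BEq κ] [LawfulBEq κ]
    (g : β → ν) (dflt : ν) :
    ∀ (l : List (κ × β)) (d : PySem.Dict κ ν) (k : κ), k ∉ l.map (·.1) →
      (l.foldl (fun d p => d.insert p.1 (g p.2)) d).getD k dflt = d.getD k dflt := by
  intro l
  induction l with
  | nil => intro d k _; rfl
  | cons p t ih =>
    intro d k hk
    simp only [List.map_cons, List.mem_cons, not_or] at hk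
    rw [List.foldl_cons, ih _ k hk.2, PySem.Dict.getD_insert_of_ne _ _ _ hk.1]

lemma pv_getD_foldl_insert_of_mem {κ ν β : Type} [BEq κ] [LawfulBEq κ]
    (g : β → ν) (dflt : ν) :
    ∀ (l : List (κ × β)) (d : PySem.Dict κ ν) (k : κ) (v : β),
      (l.map (·.1)).Nodup → (k, v) ∈ l →
      (l.foldl (fun d p => d.insert p.1 (g p.2)) d).getD k dflt = g v := by
  intro l
  induction l with
  | nil => intro d k v _ h; simp at h
  | cons p t ih =>
    intro d k v hnd hm
    simp only [List.map_cons, List.nodup_cons] at hnd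
    rcases List.mem_cons.mp hm with h | h
    · have hk : p.1 = k := by rw [← h]
      rw [List.foldl_cons,
        pv_getD_foldl_insert_of_not_mem g dflt t _ k (by rw [← hk]; exact hnd.1), hk]
      have hv : p.2 = v := by rw [← h]
      rw [PySem.Dict.getD_insert_self, hv]
    · exact ih _ k v hnd.2 h

lemma pv_sum_indicator_zero (x : Int) :
    ∀ (K : List Int), x ∉ K → (K.map (fun f => if x = f then (1 : Nat) else 0)).sum = 0 := by
  intro K
  induction K with
  | nil => intro _; rfl
  | cons k t ih =>
    intro h
    simp only [List.mem_cons, not_or] at h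
    simp [if_neg h.1, ih h.2]

lemma pv_sum_indicator_one (x : Int) :
    ∀ (K : List Int), K.Nodup → x ∈ K →
      (K.map (fun f => if x = f then (1 : Nat) else 0)).sum = 1 := by
  intro K
  induction K with
  | nil => intro _ h; simp at h
  | cons k t ih =>
    intro hnd hm
    rw [List.nodup_cons] at hnd
    rcases List.mem_cons.mp hm with h | h
    · subst h
      simp [pv_sum_indicator_zero x t hnd.1]
    · have hx : x ≠ k := fun hxk => hnd.1 (hxk ▸ h)
      simp [if_neg hx, ih hnd.2 h]

lemma pv_letters_nodup : pvLETTERS.Nodup := by decide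

set_option maxRecDepth 4000 in
lemma pv_find_vals : pvLETTERS.map pvFindE =
    [2, 19, 11, 9, 0, 15, 16, 7, 4, 22, 21, 10, 13, 5, 3, 18, 24, 8, 6, 1, 12, 20, 14, 23, 17, 25] := by
  rfl

lemma pv_find_nodup : (pvLETTERS.map pvFindE).Nodup := by
  rw [pv_find_vals]; decide

lemma pv_find_bounds : ∀ c ∈ pvLETTERS, 0 ≤ pvFindE c ∧ pvFindE c < 26 := by
  intro c hc
  have hm : pvFindE c ∈ pvLETTERS.map pvFindE := List.mem_map_of_mem hc
  rw [pv_find_vals] at hm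
  exact (by decide :
    ∀ x ∈ ([2, 19, 11, 9, 0, 15, 16, 7, 4, 22, 21, 10, 13, 5, 3, 18, 24, 8, 6, 1, 12, 20,
      14, 23, 17, 25] : List Int), 0 ≤ x ∧ x < 26) _ hm

lemma pv_mem_group (cnt : Char → Int) (f : Int) (c : Char) :
    c ∈ pvGroup cnt f ↔ c ∈ pvLETTERS ∧ cnt c = f := by
  simp [pvGroup, List.mem_filter]

-- THE ORDER LEMMA: A's bucket pipeline output equals B's single composite-key sort
lemma pv_order (cnt : Char → Int) :
    PySem.List.sorted pvLETTERS (fun c => 26 * cnt c + pvFindE c) true =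
    (PySem.List.sorted (pvK cnt) (fun x => x) true).flatMap
      (fun f => PySem.List.sorted (pvGroup cnt f) pvFindE true) := by
  set key : Char → Int := fun c => 26 * cnt c + pvFindE c with hkey
  set F := PySem.List.sorted (pvK cnt) (fun x : Int => x) true with hF
  set G : Int → List Char := fun f => PySem.List.sorted (pvGroup cnt f) pvFindE true with hG
  have hKnodup : (pvK cnt).Nodup := PySem.Set.nodup_ofList _
  have hFperm : F.Perm (pvK cnt) := PySem.List.sorted_perm _ _ _
  have hFnodup : F.Nodup := hFperm.nodup_iff.mpr hKnodup
  have hFpair : F.Pairwise (fun a b => b < a) := by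
    have h1 := PySem.List.sorted_pairwise_rev (pvK cnt) (fun x : Int => x)
    exact (h1.and hFnodup).imp (fun h => lt_of_le_of_ne h.1 (Ne.symm h.2))
  have hGmem : ∀ f c, c ∈ G f ↔ c ∈ pvLETTERS ∧ cnt c = f := by
    intro f c
    rw [hG, PySem.List.mem_sorted]
    exact pv_mem_group cnt f c
  apply PySem.List.sorted_rev_eq_of_perm_of_pairwise_gt
  · -- permutation
    rw [List.perm_iff_count]
    intro c
    rw [List.count_flatMap]
    have hc1 : ∀ f ∈ F, (List.count c ∘ G) f = List.count c (pvGroup cnt f) := by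
      intro f _
      exact (PySem.List.sorted_perm _ _ _).count_eq c
    rw [List.map_congr_left hc1, ((hFperm.map (fun f => List.count c (pvGroup cnt f)))).sum_eq]
    by_cases hc : c ∈ pvLETTERS
    · have hcnt1 : pvLETTERS.count c = 1 := List.count_eq_one_of_mem pv_letters_nodup hc
      have hgrp : ∀ f, List.count c (pvGroup cnt f) = if cnt c = f then 1 else 0 := by
        intro f
        by_cases h : cnt c = f
        · rw [if_pos h]
          unfold pvGroup
          rw [List.count_filter (by simp [h]), hcnt1]
        · rw [if_neg h, List.count_eq_zero]
          intro hmem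
          exact h ((pv_mem_group cnt f c).mp hmem).2
      rw [List.map_congr_left (fun f _ => hgrp f), hcnt1]
      exact pv_sum_indicator_one (cnt c) (pvK cnt) hKnodup
        ((PySem.Set.mem_ofList _ _).mpr (List.mem_map_of_mem hc))
    · have hR : pvLETTERS.count c = 0 := List.count_eq_zero.mpr hc
      have hgrp : ∀ f ∈ pvK cnt, List.count c (pvGroup cnt f) = 0 := by
        intro f _
        rw [List.count_eq_zero]
        intro hmem
        exact hc ((pv_mem_group cnt f c).mp hmem).1
      rw [hR, List.map_congr_left hgrp]
      simp
  · -- pairwise strictly decreasing composite key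
    rw [List.pairwise_flatMap]
    constructor
    · intro f hfF
      have hGnodup : (G f).Nodup :=
        (PySem.List.sorted_perm _ _ _).nodup_iff.mpr (pv_letters_nodup.filter _)
      have hle := PySem.List.sorted_pairwise_rev (pvGroup cnt f) pvFindE
      refine ((hle.and hGnodup).imp_of_mem ?_)
      intro a b ha hb hab
      have ha' := (hGmem f a).mp ha
      have hb' := (hGmem f b).mp hb
      have hne : pvFindE b ≠ pvFindE a := fun h =>
        hab.2 (List.inj_on_of_nodup_map pv_find_nodup hb'.1 ha'.1 h).symm
      have hlt : pvFindE b < pvFindE a := lt_of_le_of_ne hab.1 hne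
      show 26 * cnt b + pvFindE b < 26 * cnt a + pvFindE a
      rw [ha'.2, hb'.2]
      omega
    · refine hFpair.imp_of_mem ?_
      intro f g _ _ hlt a ha b hb
      have ha' := (hGmem f a).mp ha
      have hb' := (hGmem g b).mp hb
      have hba := pv_find_bounds a ha'.1
      have hbb := pv_find_bounds b hb'.1
      show 26 * cnt b + pvFindE b < 26 * cnt a + pvFindE a
      rw [ha'.2, hb'.2]
      omega

-- ===== glue: characterizing A's pipeline =====

set_option maxRecDepth 4000 in
lemma pv_init_items : (PySem.Dict.ofList
    [('A', (0:Int)), ('B', 0), ('C', 0), ('D', 0), ('E', 0), ('F', 0),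
     ('G', 0), ('H', 0), ('I', 0), ('J', 0), ('K', 0), ('L', 0), ('M', 0), ('N', 0),
     ('O', 0), ('P', 0), ('Q', 0), ('R', 0), ('S', 0), ('T', 0), ('U', 0), ('V', 0),
     ('W', 0), ('X', 0), ('Y', 0), ('Z', 0)]).items = pvLETTERS.map (fun c => (c, 0)) := by
  rfl

set_option maxRecDepth 4000 in
lemma pv_init_keys : (PySem.Dict.ofList
    [('A', (0:Int)), ('B', 0), ('C', 0), ('D', 0), ('E', 0), ('F', 0),
     ('G', 0), ('H', 0), ('I', 0), ('J', 0), ('K', 0), ('L', 0), ('M', 0), ('N', 0),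
     ('O', 0), ('P', 0), ('Q', 0), ('R', 0), ('S', 0), ('T', 0), ('U', 0), ('V', 0),
     ('W', 0), ('X', 0), ('Y', 0), ('Z', 0)]).keys = pvLETTERS := by decide

lemma pv_init_getD : ∀ c ∈ pvLETTERS, (PySem.Dict.ofList
    [('A', (0:Int)), ('B', 0), ('C', 0), ('D', 0), ('E', 0), ('F', 0),
     ('G', 0), ('H', 0), ('I', 0), ('J', 0), ('K', 0), ('L', 0), ('M', 0), ('N', 0),
     ('O', 0), ('P', 0), ('Q', 0), ('R', 0), ('S', 0), ('T', 0), ('U', 0), ('V', 0),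
     ('W', 0), ('X', 0), ('Y', 0), ('Z', 0)]).getD c 0 = 0 := by
  intro c hc
  have hm : (c, (0:Int)) ∈ (PySem.Dict.ofList
    [('A', (0:Int)), ('B', 0), ('C', 0), ('D', 0), ('E', 0), ('F', 0),
     ('G', 0), ('H', 0), ('I', 0), ('J', 0), ('K', 0), ('L', 0), ('M', 0), ('N', 0),
     ('O', 0), ('P', 0), ('Q', 0), ('R', 0), ('S', 0), ('T', 0), ('U', 0), ('V', 0),
     ('W', 0), ('X', 0), ('Y', 0), ('Z', 0)]).items := by
    rw [pv_init_items]
    exact List.mem_map_of_mem hc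
  have hnd := pv_init_keys ▸ pv_letters_nodup
  exact PySem.Dict.getD_of_mem_items _ hm hnd 0

lemma pv_ltf_items (s : String) :
    (pvGetLetterCount s).items = pvLETTERS.map (fun k => (k, pvCnt s k)) := by
  set ups := PySem.Chars.upper s.toList with hups
  set d0 := PySem.Dict.ofList
    [('A', (0:Int)), ('B', 0), ('C', 0), ('D', 0), ('E', 0), ('F', 0),
     ('G', 0), ('H', 0), ('I', 0), ('J', 0), ('K', 0), ('L', 0), ('M', 0), ('N', 0),
     ('O', 0), ('P', 0), ('Q', 0), ('R', 0), ('S', 0), ('T', 0), ('U', 0), ('V', 0),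
     ('W', 0), ('X', 0), ('Y', 0), ('Z', 0)] with hd0
  have hfold : pvGetLetterCount s =
      (ups.filter (fun x => PySem.Chars.isIn [x] pvLETTERS)).foldl
        (fun d x => d.modify x 0 (· + 1)) d0 := by
    unfold pvGetLetterCount
    exact PySem.List.foldl_if_eq_foldl_filter _ _ _ _
  have hkeys : (pvGetLetterCount s).keys = pvLETTERS := by
    rw [hfold, PySem.Dict.keys_foldl_modify, pv_init_keys]
    apply pv_set_update_id
    intro x hx
    exact (pv_isIn_singleton x pvLETTERS).mp (List.mem_filter.mp hx).2
  have hnodup : (pvGetLetterCount s).keys.Nodup := by rw [hkeys]; exact pv_letters_nodup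
  have hget : ∀ c ∈ pvLETTERS, (pvGetLetterCount s).getD c 0 = ((ups.count c : Nat) : Int) := by
    intro c hc
    rw [hfold, PySem.Dict.getD_foldl_modify_add_one, pv_init_getD c hc,
      List.count_filter (p := fun x => PySem.Chars.isIn [x] pvLETTERS) (a := c)
        (by simp [pv_isIn_singleton, hc])]
    simp
  rw [PySem.Dict.items_eq_map_keys _ hnodup 0, hkeys]
  exact List.map_congr_left (fun k hk => by rw [hget k hk]; rfl)

lemma pv_step_eq (d : PySem.Dict Int (List Char)) (p : Char × Int) :
    (let d' := if d.contains p.2 then d else d.insert p.2 []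
     d'.modify p.2 [] (· ++ [p.1])) = d.modify p.2 [] (· ++ [p.1]) := by
  by_cases h : d.contains p.2 = true
  · simp [h]
  · have hf : d.contains p.2 = false := by simpa using h
    rw [if_neg h]
    simp only [PySem.Dict.modify, PySem.Dict.getD_insert_self,
      PySem.Dict.insert_insert_self, PySem.Dict.getD_of_not_contains d _ hf]

-- the grouping fold of A, rewritten with swapped pairs over the letters
lemma pv_ftl_eq (cnt : Char → Int) :
    ((pvLETTERS.map (fun k => (k, cnt k))).foldl
        (fun d p =>
          let d' := if d.contains p.2 then d else d.insert p.2 []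
          d'.modify p.2 [] (· ++ [p.1])) PySem.Dict.empty) =
      ((pvLETTERS.map (fun k => (cnt k, k))).foldl
        (fun d p => d.modify p.1 [] (· ++ [p.2])) PySem.Dict.empty) := by
  rw [PySem.List.foldl_congr_mem _ _ (fun d p => d.modify p.2 [] (· ++ [p.1])) _
    (fun acc x _ => pv_step_eq acc x)]
  rw [List.foldl_map, List.foldl_map]

lemma pv_ftl_getD (cnt : Char → Int) (f : Int) :
    ((pvLETTERS.map (fun k => (cnt k, k))).foldl
        (fun d p => d.modify p.1 [] (· ++ [p.2])) PySem.Dict.empty).getD f [] =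
      pvGroup cnt f := by
  rw [PySem.Dict.getD_foldl_modify_append]
  simp [List.filter_map, List.map_map, Function.comp_def, pvGroup, PySem.Dict.getD_empty]

lemma pv_set_update_nil {α : Type} [BEq α] (l : List α) :
    PySem.Set.update ([] : PySem.Set α) l = PySem.Set.ofList l := by
  rw [PySem.Set.ofList_eq_foldl]; rfl

lemma pv_ftl_keys (cnt : Char → Int) :
    ((pvLETTERS.map (fun k => (cnt k, k))).foldl
        (fun d p => d.modify p.1 [] (· ++ [p.2])) PySem.Dict.empty).keys = pvK cnt := by
  rw [PySem.Dict.keys_foldl_modify_key _ (fun p : Int × Char => p.1) []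
    (fun d p => (· ++ [p.2])) PySem.Dict.empty]
  rw [show (PySem.Dict.empty : PySem.Dict Int (List Char)).keys = [] from rfl, pv_set_update_nil]
  simp [pvK, List.map_map, Function.comp_def]

set_option maxHeartbeats 1000000 in
lemma pv_freq_order (s : String) :
    pvGetFrequencyOrder s =
      (PySem.List.sorted (pvK (pvCnt s)) (fun x => x) true).flatMap
        (fun f => PySem.List.sorted (pvGroup (pvCnt s) f) pvFindE true) := by
  have hftl : pvFreqToLetter s =
      (pvLETTERS.map (fun k => (pvCnt s k, k))).foldl
        (fun d p => d.modify p.1 [] (· ++ [p.2])) PySem.Dict.empty := by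
    unfold pvFreqToLetter
    rw [pv_ltf_items s]
    exact pv_ftl_eq (pvCnt s)
  have hkeys : (pvFreqToLetter s).keys = pvK (pvCnt s) := by
    rw [hftl]; exact pv_ftl_keys (pvCnt s)
  have hknd : (pvFreqToLetter s).keys.Nodup := by
    rw [hkeys]; exact PySem.Set.nodup_ofList _
  have hgetD : ∀ f, (pvFreqToLetter s).getD f [] = pvGroup (pvCnt s) f := by
    intro f; rw [hftl]; exact pv_ftl_getD (pvCnt s) f
  have hitems : (pvFreqToLetter s).items =
      (pvK (pvCnt s)).map (fun k => (k, pvGroup (pvCnt s) k)) := by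
    rw [PySem.Dict.items_eq_map_keys _ hknd [], hkeys]
    exact List.map_congr_left (fun k _ => by rw [hgetD k])
  have hmapfst : (pvFreqToLetter s).items.map (fun p => p.1) = (pvFreqToLetter s).keys := rfl
  have hkeys2 : (pvFreqToLetter2 s).keys = pvK (pvCnt s) := by
    unfold pvFreqToLetter2
    rw [PySem.Dict.keys_foldl_insert_key _ (fun p : Int × List Char => p.1)
      (fun d p => PySem.List.sorted p.2 (fun c => PySem.Chars.find pvETAOIN [c]) true) _,
      hkeys]
    apply pv_set_update_id
    intro x hx
    rw [hmapfst, hkeys] at hx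
    exact hx
  have hget2 : ∀ f ∈ pvK (pvCnt s), (pvFreqToLetter2 s).getD f [] =
      PySem.List.sorted (pvGroup (pvCnt s) f) pvFindE true := by
    intro f hf
    have hnd : ((pvFreqToLetter s).items.map (fun p => p.1)).Nodup := by
      rw [hmapfst]; exact hknd
    have hmem : (f, pvGroup (pvCnt s) f) ∈ (pvFreqToLetter s).items := by
      rw [hitems]; exact List.mem_map_of_mem hf
    unfold pvFreqToLetter2
    rw [pv_getD_foldl_insert_of_mem
      (fun v : List Char => PySem.List.sorted v (fun c => PySem.Chars.find pvETAOIN [c]) true)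
      [] (pvFreqToLetter s).items (pvFreqToLetter s) f (pvGroup (pvCnt s) f) hnd hmem]
    rfl
  unfold pvGetFrequencyOrder
  rw [hkeys2]
  have hstep : (PySem.List.sorted (pvK (pvCnt s)) (fun x => x) true).foldl
        (fun acc freq => acc ++ (pvFreqToLetter2 s).getD freq []) [] =
      (PySem.List.sorted (pvK (pvCnt s)) (fun x => x) true).foldl
        (fun acc freq => acc ++ PySem.List.sorted (pvGroup (pvCnt s) freq) pvFindE true) [] :=
    PySem.List.foldl_congr_mem _ _ _ _
      (fun acc x hx => by rw [hget2 x ((PySem.List.mem_sorted _ _ _ _).mp hx)])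
  rw [hstep, PySem.List.foldl_append_eq_flatMap]
  exact List.nil_append _

lemma pv_B_key (s : String) :
    (fun c => 26 * ((PySem.Chars.count (PySem.Chars.upper s.toList) [c] : Nat) : Int) +
      PySem.Chars.find pvETAOIN [c]) =
    (fun c => 26 * pvCnt s c + pvFindE c) := by
  funext c
  rw [pv_count_singleton]
  rfl

lemma pv_ordered_eq (s : String) :
    pvGetFrequencyOrder s =
      PySem.List.sorted pvLETTERS
        (fun c => 26 * ((PySem.Chars.count (PySem.Chars.upper s.toList) [c] : Nat) : Int) +
          PySem.Chars.find pvETAOIN [c]) true := by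
  rw [pv_B_key s, pv_freq_order s, pv_order (pvCnt s)]

-- ===== VERDICT (by name: the statement is the Claim_ definition above) =====
theorem english_freq_match_score_spec : Claim_equal_english_freq_match_score := by
  intro s _
  show english_freq_match_score s = english_freq_match_score_alt s
  simp only [english_freq_match_score, english_freq_match_score_alt, pv_ordered_eq]
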